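-- pv_equiv track=rewrite | github.com/resilient-tech/india-compliance | india_compliance/gst_india/doctype/purchase_reconciliation_tool/__init__.py | get_cleaner_bill_no
-- ===== SOURCE A (Python) =====
-- def get_cleaner_bill_no(bill_no, fy):
--     """
--     - Attempts to return bill number without financial year.
--     - Removes trailing zeros from bill number.
--     """
--
--     fy = fy.split("-")
--     replace_list = [
--         f"{fy[0]}-{fy[1]}",
--         f"{fy[0]}/{fy[1]}",
--         f"{fy[0]}-{fy[1][2:]}",
--         f"{fy[0]}/{fy[1][2:]}",
--         f"{fy[0][2:]}-{fy[1][2:]}",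
--         f"{fy[0][2:]}/{fy[1][2:]}",
--         "/",  # these are only special characters allowed in invoice
--         "-",
--     ]
--
--     inv = bill_no
--     for replace in replace_list:
--         inv = inv.replace(replace, " ")
--     inv = " ".join(inv.split()).lstrip("0")
--     return inv
-- ===== SOURCE B (Python) =====
-- def get_cleaner_bill_no(bill_no, fy):
--     """Same cleaning, but via split/rejoin on a generated pattern list instead of
--     eight hard-coded str.replace passes (idiomatic rewrite)."""
--     parts = fy.split("-")
--     pairs = [
--         (parts[0], parts[1]),
--         (parts[0], parts[1][2:]),
--         (parts[0][2:], parts[1][2:]),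
--     ]
--     patterns = [a + sep + b for a, b in pairs for sep in "-/"] + ["/", "-"]
--
--     def scrub(s, pats):
--         if not pats:
--             return s
--         return scrub(" ".join(s.split(pats[0])), pats[1:])
--
--     return " ".join(scrub(bill_no, patterns).split()).lstrip("0")
-- ===== Notes on version B (the rewrite author's own statement) =====
-- stated objective: idiomatic
-- what changed: B generates the eight patterns from a (prefix-pair x separator) product and removes each by splitting the string on the pattern and rejoining with a space in a recursive scrub, instead of A's hard-coded list of eight sequential str.replace passes.
import Mathlib
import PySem

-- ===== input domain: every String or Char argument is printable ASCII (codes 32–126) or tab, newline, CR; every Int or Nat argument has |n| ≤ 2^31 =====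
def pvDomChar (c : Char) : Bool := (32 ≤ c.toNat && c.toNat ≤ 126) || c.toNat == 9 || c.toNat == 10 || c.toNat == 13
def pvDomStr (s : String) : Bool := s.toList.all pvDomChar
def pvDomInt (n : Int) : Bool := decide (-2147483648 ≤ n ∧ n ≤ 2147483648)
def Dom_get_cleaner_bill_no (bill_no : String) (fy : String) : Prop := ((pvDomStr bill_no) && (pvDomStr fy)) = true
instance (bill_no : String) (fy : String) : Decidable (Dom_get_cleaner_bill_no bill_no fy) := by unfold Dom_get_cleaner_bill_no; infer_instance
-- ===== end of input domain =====

-- B replaces A's eight sequential str.replace passes by split/rejoin over a generated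
-- pattern list (idiomatic rewrite, same cost); proved equal wherever A returns.


-- hand port of s.lstrip("0") (PySem has no lstrip-with-chars): drop leading '0's; exact
def pvLstrip0 (s : String) : String := String.ofList (s.toList.dropWhile (fun c => c == '0'))

-- ===== PORT A =====
def get_cleaner_bill_no (bill_no : String) (fy : String) : String :=
  let fyl := (PySem.Str.split? fy "-").getD []   -- fy.split("-"); sep "-" ≠ "" so split? is some
  match PySem.List.pyGet? fyl 0, PySem.List.pyGet? fyl 1 with
  | some f0, some f1 =>
    let replace_list : List String :=
      [ f0 ++ "-" ++ f1,
        f0 ++ "/" ++ f1,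
        f0 ++ "-" ++ PySem.Str.slice f1 (some 2) none,
        f0 ++ "/" ++ PySem.Str.slice f1 (some 2) none,
        PySem.Str.slice f0 (some 2) none ++ "-" ++ PySem.Str.slice f1 (some 2) none,
        PySem.Str.slice f0 (some 2) none ++ "/" ++ PySem.Str.slice f1 (some 2) none,
        "/", "-" ]
    let inv := replace_list.foldl (fun inv r => PySem.Str.replace inv r " ") bill_no
    pvLstrip0 (PySem.Str.join " " (PySem.Str.split₀ inv))
  | _, _ => ""   -- fy[1] IndexError in Python: excluded by Pre_

-- ===== PORT B =====
-- B's scrub: successively split on the pattern and rejoin with a space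
def pvScrub : String → List String → String
  | s, [] => s
  | s, p :: rest => pvScrub (PySem.Str.join " " ((PySem.Str.split? s p).getD [])) rest

-- B's hand port of s.lstrip("0") (PySem has no lstrip-with-chars): drop leading '0's; exact
def pvLstrip0Alt (s : String) : String := String.ofList (s.toList.dropWhile (fun c => c == '0'))

def get_cleaner_bill_no_alt (bill_no : String) (fy : String) : String :=
  let parts := (PySem.Str.split? fy "-").getD []
  match PySem.List.pyGet? parts 0 with
  | none => ""   -- parts[1] IndexError in Python: excluded by Pre_
  | some p0 =>
  match PySem.List.pyGet? parts 1 with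
  | none => ""
  | some p1 =>
    let pairs : List (String × String) :=
      [ (p0, p1),
        (p0, PySem.Str.slice p1 (some 2) none),
        (PySem.Str.slice p0 (some 2) none, PySem.Str.slice p1 (some 2) none) ]
    let patterns := (pairs.flatMap (fun ab => ["-", "/"].map (fun sep => ab.1 ++ sep ++ ab.2))) ++ ["/", "-"]
    pvLstrip0Alt (PySem.Str.join " " (PySem.Str.split₀ (pvScrub bill_no patterns)))

-- ===== PRECONDITION & SPEC =====
-- Pre_ excludes exactly the inputs where Python A raises IndexError: fy without a "-" (fy.split("-")[1] fails)
def Pre_get_cleaner_bill_no (bill_no : String) (fy : String) : Prop := PySem.Str.isIn "-" fy = true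
instance (bill_no : String) (fy : String) : Decidable (Pre_get_cleaner_bill_no bill_no fy) := by unfold Pre_get_cleaner_bill_no; infer_instance
def pvWitness_get_cleaner_bill_no : String × String := ("INV-2021-22/0042", "2021-22")
def Spec_get_cleaner_bill_no (bill_no : String) (fy : String) (out : String) : Prop := out = get_cleaner_bill_no_alt bill_no fy
instance (bill_no : String) (fy : String) (out : String) : Decidable (Spec_get_cleaner_bill_no bill_no fy out) := by unfold Spec_get_cleaner_bill_no; infer_instance

-- ===== CLAIM (what is proved, stated in full; the proofs are below) =====
def Claim_equal_get_cleaner_bill_no : Prop := ∀ (bill_no : String) (fy : String), Dom_get_cleaner_bill_no bill_no fy → Pre_get_cleaner_bill_no bill_no fy → Spec_get_cleaner_bill_no bill_no fy (get_cleaner_bill_no bill_no fy)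

-- ===== LEMMAS AND PROOFS =====

-- spec of one replace pass, for a nonempty pattern a :: s'
def pvRepl (a : Char) (s' new : List Char) : List Char → List Char
  | [] => []
  | c :: t =>
    if (a :: s').isPrefixOf (c :: t) then new ++ pvRepl a s' new (List.drop s'.length t)
    else c :: pvRepl a s' new t
  termination_by l => l.length
  decreasing_by
    · simp only [List.length_cons, List.length_drop]; omega
    · simp only [List.length_cons]; omega

-- spec of one split pass, for a nonempty separator a :: s'
def pvSplit (a : Char) (s' : List Char) : List Char → List Char → List (List Char)
  | [], cur => [cur.reverse]
  | c :: t, cur =>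
    if (a :: s').isPrefixOf (c :: t) then cur.reverse :: pvSplit a s' (List.drop s'.length t) []
    else pvSplit a s' t (c :: cur)
  termination_by l _ => l.length
  decreasing_by
    · simp only [List.length_cons, List.length_drop]; omega
    · simp only [List.length_cons]; omega

theorem replace_go_eq (a : Char) (s' new : List Char) :
    ∀ fuel l acc, l.length ≤ fuel →
      PySem.Chars.replace.go (a :: s') new fuel l acc = acc.reverse ++ pvRepl a s' new l := by
  intro fuel
  induction fuel with
  | zero =>
    intro l acc h
    have : l = [] := List.eq_nil_of_length_eq_zero (Nat.le_zero.mp h)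
    subst this
    rw [PySem.Chars.replace.go.eq_def]
    simp [pvRepl]
  | succ n ih =>
    intro l acc h
    cases l with
    | nil => rw [PySem.Chars.replace.go.eq_def]; simp [pvRepl]
    | cons c t =>
      rw [PySem.Chars.replace.go.eq_def]
      simp only []
      by_cases hp : (a :: s').isPrefixOf (c :: t) = true
      · simp only [hp, if_pos]
        have hlen : (List.drop (a :: s').length (c :: t)).length ≤ n := by
          simp only [List.length_drop, List.length_cons] at *; omega
        rw [ih _ _ hlen]
        rw [pvRepl]
        simp [hp, List.drop_succ_cons]
      · rw [if_neg hp]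
        have hlen : t.length ≤ n := by simp only [List.length_cons] at h; omega
        rw [ih _ _ hlen, pvRepl, if_neg hp]
        simp

theorem splitOn_go_eq (a : Char) (s' : List Char) :
    ∀ fuel l cur acc, l.length < fuel →
      PySem.Chars.splitOn.go (a :: s') fuel l cur acc = acc.reverse ++ pvSplit a s' l cur := by
  intro fuel
  induction fuel with
  | zero => intro l cur acc h; omega
  | succ n ih =>
    intro l cur acc h
    cases l with
    | nil => rw [PySem.Chars.splitOn.go.eq_def]; simp [pvSplit]
    | cons c t =>
      rw [PySem.Chars.splitOn.go.eq_def]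
      simp only []
      by_cases hp : (a :: s').isPrefixOf (c :: t) = true
      · rw [if_pos hp]
        have hlen : (List.drop (a :: s').length (c :: t)).length < n := by
          simp only [List.length_drop, List.length_cons] at *; omega
        rw [ih _ _ _ hlen, pvSplit, if_pos hp]
        simp [List.drop_succ_cons]
      · rw [if_neg hp]
        have hlen : t.length < n := by simp only [List.length_cons] at h; omega
        rw [ih _ _ _ hlen, pvSplit, if_neg hp]

theorem pvSplit_ne_nil (a : Char) (s' : List Char) :
    ∀ fuel l cur, l.length ≤ fuel → pvSplit a s' l cur ≠ [] := by
  intro fuel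
  induction fuel with
  | zero =>
    intro l cur h
    have : l = [] := List.eq_nil_of_length_eq_zero (Nat.le_zero.mp h)
    subst this; rw [pvSplit]; simp
  | succ n ih =>
    intro l cur h
    cases l with
    | nil => rw [pvSplit]; simp
    | cons c t =>
      rw [pvSplit]
      by_cases hp : (a :: s').isPrefixOf (c :: t) = true
      · rw [if_pos hp]; simp
      · rw [if_neg hp]
        exact ih t (c :: cur) (by simp only [List.length_cons] at h; omega)

theorem join_pvSplit (a : Char) (s' new : List Char) :
    ∀ fuel l cur, l.length ≤ fuel →
      PySem.Chars.join new (pvSplit a s' l cur) = cur.reverse ++ pvRepl a s' new l := by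
  intro fuel
  induction fuel with
  | zero =>
    intro l cur h
    have : l = [] := List.eq_nil_of_length_eq_zero (Nat.le_zero.mp h)
    subst this
    rw [pvSplit, pvRepl, PySem.Chars.join_singleton]
    simp
  | succ n ih =>
    intro l cur h
    cases l with
    | nil => rw [pvSplit, pvRepl, PySem.Chars.join_singleton]; simp
    | cons c t =>
      rw [pvSplit, pvRepl]
      by_cases hp : (a :: s').isPrefixOf (c :: t) = true
      · rw [if_pos hp, if_pos hp]
        have hlen : (List.drop s'.length t).length ≤ n := by
          simp only [List.length_drop, List.length_cons] at *; omega
        rcases hsp : pvSplit a s' (List.drop s'.length t) [] with _ | ⟨q, rest⟩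
        · exact absurd hsp (pvSplit_ne_nil a s' n _ [] hlen)
        · rw [PySem.Chars.join_cons_cons]
          have hih := ih (List.drop s'.length t) [] hlen
          rw [hsp] at hih
          rw [hih]
          simp
      · rw [if_neg hp, if_neg hp]
        have hlen : t.length ≤ n := by simp only [List.length_cons] at h; omega
        rw [ih _ _ hlen]
        simp

theorem chars_replace_eq_join (a : Char) (s' new s : List Char) :
    PySem.Chars.replace s (a :: s') new = PySem.Chars.join new (PySem.Chars.splitOn s (a :: s')) := by
  unfold PySem.Chars.replace PySem.Chars.splitOn
  rw [if_neg (by simp)]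
  rw [replace_go_eq a s' new s.length s [] (le_refl _),
      splitOn_go_eq a s' (s.length + 1) s [] [] (Nat.lt_succ_self _)]
  simp only [List.reverse_nil, List.nil_append]
  rw [join_pvSplit a s' new s.length s [] (le_refl _)]
  simp

theorem step_eq (s p : String) (hp : p.toList ≠ []) :
    PySem.Str.join " " ((PySem.Str.split? s p).getD []) = PySem.Str.replace s p " " := by
  rcases hlp : p.toList with _ | ⟨a, s'⟩
  · exact absurd hlp hp
  · unfold PySem.Str.join PySem.Str.split? PySem.Str.replace PySem.Chars.split?
    rw [hlp, if_neg (by simp)]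
    simp only [Option.map_some, Option.getD_some, List.map_map]
    rw [chars_replace_eq_join a s']
    congr 1
    simp [Function.comp_def, String.toList_ofList]

theorem scrub_eq_foldl :
    ∀ (ps : List String) (s : String), (∀ p ∈ ps, p.toList ≠ []) →
      pvScrub s ps = ps.foldl (fun inv r => PySem.Str.replace inv r " ") s := by
  intro ps
  induction ps with
  | nil => intro s _; rfl
  | cons p rest ih =>
    intro s h
    simp only [pvScrub, List.foldl_cons]
    rw [step_eq s p (h p (by simp)), ih _ (fun q hq => h q (by simp [hq]))]

-- ===== VERDICT (by name: the statement is the Claim_ definition above) =====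
set_option maxHeartbeats 1600000 in
theorem get_cleaner_bill_no_spec : Claim_equal_get_cleaner_bill_no := by
  intro bill_no fy _ _
  unfold Spec_get_cleaner_bill_no get_cleaner_bill_no get_cleaner_bill_no_alt
  dsimp only
  rcases h0 : PySem.List.pyGet? ((PySem.Str.split? fy "-").getD []) 0 with _ | f0
  · rcases h1 : PySem.List.pyGet? ((PySem.Str.split? fy "-").getD []) 1 with _ | f1 <;> rfl
  rcases h1 : PySem.List.pyGet? ((PySem.Str.split? fy "-").getD []) 1 with _ | f1
  · rfl
  dsimp only
  rw [scrub_eq_foldl]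
  · rfl
  · intro p hp
    simp at hp
    rcases hp with h | h | h | h | h | h | h | h <;> subst h <;>
      simp [String.toList_append]
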